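-- pv_equiv track=rewrite | github.com/rawmnr/ar-stitching | src/stitching/trusted/bases/zernike.py | _noll_pairs
-- ===== SOURCE A (Python) =====
-- def _noll_pairs(num_terms: int) -> list[tuple[int, int]]:
--     """Enumerate Noll Zernike (n, m) pairs."""
--
--     pairs: list[tuple[int, int]] = []
--     n = 0
--     while len(pairs) < num_terms:
--         if n % 2 == 0:
--             ordered_m = [0]
--             for abs_m in range(2, n + 1, 2):
--                 ordered_m.extend((-abs_m, abs_m))
--         else:
--             ordered_m = []
--             for abs_m in range(1, n + 1, 2):
--                 ordered_m.extend((-abs_m, abs_m))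
--         for m in ordered_m:
--             pairs.append((n, m))
--             if len(pairs) == num_terms:
--                 break
--         n += 1
--     return pairs
-- ===== SOURCE B (Python) =====
-- def _noll_pairs(num_terms: int) -> list[tuple[int, int]]:
--     """Enumerate Noll Zernike (n, m) pairs."""
--
--     pairs: list[tuple[int, int]] = []
--     n = 0
--     start = 0  # flat index of the first pair of radial level n
--     for g in range(num_terms):
--         if g - start > n:  # g begins the next level
--             start += n + 1
--             n += 1
--         i = g - start  # position within level n
--         if n % 2 == 0:
--             if i == 0:
--                 m = 0
--             else:
--                 m = 2 * ((i + 1) // 2)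
--                 if i % 2 == 1:
--                     m = -m
--         else:
--             m = 2 * (i // 2) + 1
--             if i % 2 == 0:
--                 m = -m
--         pairs.append((n, m))
--     return pairs
-- ===== Notes on version B (the rewrite author's own statement) =====
-- stated objective: alternative
-- what changed: B replaces A's outer while-loop that builds a per-level ordered_m list (with an inner append/break loop) by a single for-loop over range(num_terms) that derives each (n, m) directly from the flat index via running level counters and a parity formula for m.
import Mathlib
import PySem

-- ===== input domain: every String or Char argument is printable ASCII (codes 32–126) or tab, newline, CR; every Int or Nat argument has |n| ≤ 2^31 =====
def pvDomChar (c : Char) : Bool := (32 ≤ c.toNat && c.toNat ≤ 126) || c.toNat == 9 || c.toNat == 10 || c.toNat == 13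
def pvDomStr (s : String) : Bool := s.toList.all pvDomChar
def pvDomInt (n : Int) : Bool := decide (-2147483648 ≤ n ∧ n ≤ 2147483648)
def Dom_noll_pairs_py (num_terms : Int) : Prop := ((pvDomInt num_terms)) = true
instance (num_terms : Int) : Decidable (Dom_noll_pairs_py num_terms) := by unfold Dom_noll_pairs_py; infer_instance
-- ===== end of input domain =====

-- B replaces A's per-level ordered_m list building and nested append/break loops by a single
-- pass over range(num_terms) that derives each (n, m) from the flat index by level counters
-- and a parity formula (objective: alternative decomposition, same cost).

-- ===== PORT A =====
-- the ordered_m list A builds for radial level n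
def nollOrderedM (n : Int) : List Int :=
  if PySem.Int.mod n 2 = 0 then
    (PySem.List.pyRange 2 (n + 1) 2).foldl (fun acc a => acc ++ [-a, a]) [0]
  else
    (PySem.List.pyRange 1 (n + 1) 2).foldl (fun acc a => acc ++ [-a, a]) []

-- the inner 'for m in ordered_m: append; break when len == num_terms' loop
def nollInner (t n : Int) : List Int → List (Int × Int) → List (Int × Int)
  | [], pairs => pairs
  | m :: ms, pairs =>
    let pairs' := pairs ++ [(n, m)]
    if (pairs'.length : Int) = t then pairs' else nollInner t n ms pairs'

-- the outer 'while len(pairs) < num_terms' loop; fuel only makes it total (each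
-- reachable iteration appends at least one pair, so num_terms.toNat steps suffice)
def nollLoop (t : Int) : Nat → Int → List (Int × Int) → List (Int × Int)
  | 0, _, pairs => pairs
  | fuel + 1, n, pairs =>
    if (pairs.length : Int) < t then
      nollLoop t fuel (n + 1) (nollInner t n (nollOrderedM n) pairs)
    else pairs

def noll_pairs_py (num_terms : Int) : List (Int × Int) :=
  nollLoop num_terms num_terms.toNat 0 []

-- ===== PORT B =====
-- B's parity formula for m at position i of level n
def nollM (n i : Int) : Int :=
  if PySem.Int.mod n 2 = 0 then
    if i = 0 then 0
    else
      let m := 2 * PySem.Int.floordiv (i + 1) 2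
      if PySem.Int.mod i 2 = 1 then -m else m
  else
    let m := 2 * PySem.Int.floordiv i 2 + 1
    if PySem.Int.mod i 2 = 0 then -m else m

-- one iteration of B's loop body, state = (pairs, n, start)
def nollStep (st : List (Int × Int) × Int × Int) (g : Int) : List (Int × Int) × Int × Int :=
  let pairs := st.1
  let n0 := st.2.1
  let start0 := st.2.2
  let (n, start) := if g - start0 > n0 then (n0 + 1, start0 + n0 + 1) else (n0, start0)
  (pairs ++ [(n, nollM n (g - start))], n, start)

def noll_pairs_py_alt (num_terms : Int) : List (Int × Int) :=
  ((PySem.List.pyRange 0 num_terms 1).foldl nollStep ([], 0, 0)).1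

-- ===== PRECONDITION & SPEC =====
def Spec_noll_pairs_py (num_terms : Int) (out : List (Int × Int)) : Prop := out = noll_pairs_py_alt num_terms
instance (num_terms : Int) (out : List (Int × Int)) : Decidable (Spec_noll_pairs_py num_terms out) := by unfold Spec_noll_pairs_py; infer_instance

-- ===== CLAIM (what is proved, stated in full; the proofs are below) =====
def Claim_equal_noll_pairs_py : Prop := ∀ (num_terms : Int), Dom_noll_pairs_py num_terms → Spec_noll_pairs_py num_terms (noll_pairs_py num_terms)

-- ===== LEMMAS AND PROOFS =====

-- triangular numbers: flat index of the first pair of level n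
def tri : Nat → Nat
  | 0 => 0
  | n + 1 => tri n + (n + 1)

-- the canonical pair list of level n
def levelList (n : Nat) : List (Int × Int) :=
  (List.range (n + 1)).map (fun i : Nat => ((n : Int), nollM (n : Int) (i : Int)))

-- all pairs of levels 0 .. n-1
def specUpTo : Nat → List (Int × Int)
  | 0 => []
  | n + 1 => specUpTo n ++ levelList n

-- the level containing flat index g
def lv : Nat → Nat
  | 0 => 0
  | g + 1 => if tri (lv g + 1) ≤ g + 1 then lv g + 1 else lv g

theorem tri_ge (n : Nat) : n ≤ tri n := by
  induction n with
  | zero => simp [tri]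
  | succ n ih =>
    have h2 : tri (n + 1) = tri n + (n + 1) := rfl
    omega

theorem length_levelList (n : Nat) : (levelList n).length = n + 1 := by
  simp [levelList]

theorem length_specUpTo (n : Nat) : (specUpTo n).length = tri n := by
  induction n with
  | zero => simp [specUpTo, tri]
  | succ n ih => simp [specUpTo, tri, length_levelList, ih]

theorem lv_bounds (g : Nat) : tri (lv g) ≤ g ∧ g < tri (lv g + 1) := by
  induction g with
  | zero => simp [lv, tri]
  | succ g ih =>
    have h2 : tri (lv g + 1 + 1) = tri (lv g + 1) + (lv g + 1 + 1) := rfl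
    by_cases h : tri (lv g + 1) ≤ g + 1
    · simp only [lv, if_pos h]
      omega
    · simp only [lv, if_neg h]
      omega

theorem specUpTo_append (a b : Nat) (h : a ≤ b) :
    ∃ r, specUpTo b = specUpTo a ++ r := by
  induction b with
  | zero =>
    have : a = 0 := by omega
    subst this
    exact ⟨[], by simp⟩
  | succ b ih =>
    rcases Nat.lt_or_ge a (b+1) with h' | h'
    · obtain ⟨r, hr⟩ := ih (by omega)
      exact ⟨r ++ levelList b, by simp [specUpTo, hr]⟩
    · have : a = b + 1 := by omega
      subst this
      exact ⟨[], by simp⟩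

theorem take_specUpTo_eq {k a b : Nat} (ha : k ≤ tri a) (hb : k ≤ tri b) :
    (specUpTo a).take k = (specUpTo b).take k := by
  rcases Nat.le_total a b with h | h
  · obtain ⟨r, hr⟩ := specUpTo_append a b h
    rw [hr, List.take_append_of_le_length (by rw [length_specUpTo]; exact ha)]
  · obtain ⟨r, hr⟩ := specUpTo_append b a h
    rw [hr, List.take_append_of_le_length (by rw [length_specUpTo]; exact hb)]

-- closed forms of B's m formula on natural positions
def mE (i : Nat) : Int := if i = 0 then 0 else if i % 2 = 1 then -((i : Int) + 1) else (i : Int)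
def mO (i : Nat) : Int := if i % 2 = 0 then -((i : Int) + 1) else (i : Int)

theorem nollM_even (n : Int) (hn : PySem.Int.mod n 2 = 0) (i : Nat) :
    nollM n (i : Int) = mE i := by
  have hf : PySem.Int.floordiv ((i : Int) + 1) 2 = (((i + 1) / 2 : Nat) : Int) := by
    exact_mod_cast PySem.Int.floordiv_natCast (i + 1) 2
  have hm : PySem.Int.mod (i : Int) 2 = ((i % 2 : Nat) : Int) := by
    exact_mod_cast PySem.Int.mod_natCast i 2
  simp only [nollM, mE, if_pos hn, hf, hm]
  by_cases h0 : i = 0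
  · subst h0; simp
  · rw [if_neg (by exact_mod_cast h0), if_neg h0]
    by_cases h1 : i % 2 = 1
    · rw [if_pos (by exact_mod_cast h1), if_pos h1]
      omega
    · rw [if_neg (by exact_mod_cast h1), if_neg h1]
      omega

theorem nollM_odd (n : Int) (hn : ¬ PySem.Int.mod n 2 = 0) (i : Nat) :
    nollM n (i : Int) = mO i := by
  have hf : PySem.Int.floordiv (i : Int) 2 = ((i / 2 : Nat) : Int) := by
    exact_mod_cast PySem.Int.floordiv_natCast i 2
  have hm : PySem.Int.mod (i : Int) 2 = ((i % 2 : Nat) : Int) := by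
    exact_mod_cast PySem.Int.mod_natCast i 2
  simp only [nollM, mO, if_neg hn, hf, hm]
  by_cases h1 : i % 2 = 0
  · rw [if_pos (by exact_mod_cast h1), if_pos h1]
    omega
  · rw [if_neg (by exact_mod_cast h1), if_neg h1]
    omega

-- the two ranges A iterates over, as plain index ranges
theorem pyRange_even (k : Nat) :
    PySem.List.pyRange 2 (2 * (k : Int) + 1) 2 = (List.range k).map (fun j : Nat => 2 + 2 * (j : Int)) := by
  have hc : (if (2 : Int) < 2 * (k : Int) + 1 then ((2 * (k : Int) + 1 - 2 + 2 - 1) / 2).toNat else 0) = k := by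
    split_ifs with h <;> omega
  rw [PySem.List.pyRange_of_pos _ _ (by norm_num), hc]

theorem pyRange_odd (k : Nat) :
    PySem.List.pyRange 1 (2 * (k : Int) + 2) 2 = (List.range (k + 1)).map (fun j : Nat => 1 + 2 * (j : Int)) := by
  have hc : (if (1 : Int) < 2 * (k : Int) + 2 then ((2 * (k : Int) + 2 - 1 + 2 - 1) / 2).toNat else 0) = k + 1 := by
    split_ifs with h <;> omega
  rw [PySem.List.pyRange_of_pos _ _ (by norm_num), hc]

theorem even_flat (k : Nat) :
    [(0 : Int)] ++ ((List.range k).map (fun j : Nat => 2 + 2 * (j : Int))).flatMap (fun a => [-a, a])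
      = (List.range (2 * k + 1)).map mE := by
  induction k with
  | zero => simp [mE]
  | succ k ih =>
    rw [List.range_succ, List.map_append, List.flatMap_append,
        show 2 * (k + 1) + 1 = (2 * k + 1) + 1 + 1 by omega,
        List.range_succ, List.range_succ, List.map_append, List.map_append, ← List.append_assoc, ← ih]
    have e1 : mE (2 * k + 1) = -(2 + 2 * (k : Int)) := by
      have h1 : ¬ (2 * k + 1 = 0) := by omega
      have h2 : (2 * k + 1) % 2 = 1 := by omega
      simp only [mE, if_neg h1, if_pos h2]
      push_cast
      ring
    have e2 : mE (2 * k + 1 + 1) = 2 + 2 * (k : Int) := by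
      have h1 : ¬ (2 * k + 1 + 1 = 0) := by omega
      have h2 : ¬ ((2 * k + 1 + 1) % 2 = 1) := by omega
      simp only [mE, if_neg h1, if_neg h2]
      push_cast
      ring
    simp [e1, e2]

theorem odd_flat (k : Nat) :
    ((List.range (k + 1)).map (fun j : Nat => 1 + 2 * (j : Int))).flatMap (fun a => [-a, a])
      = (List.range (2 * k + 2)).map mO := by
  induction k with
  | zero => decide
  | succ k ih =>
    have hR : List.range (2 * (k + 1) + 2) = (List.range (2 * k + 2) ++ [2 * k + 2]) ++ [2 * k + 3] := by
      rw [show 2 * (k + 1) + 2 = (2 * k + 3) + 1 by omega, List.range_succ,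
          show 2 * k + 3 = (2 * k + 2) + 1 by omega, List.range_succ]
    rw [hR, List.range_succ (n := k + 1), List.map_append, List.flatMap_append, ih]
    have e1 : mO (2 * k + 2) = -(1 + 2 * ((k : Int) + 1)) := by
      have h1 : (2 * k + 2) % 2 = 0 := by omega
      simp only [mO, if_pos h1]
      push_cast
      ring
    have e2 : mO (2 * k + 3) = 1 + 2 * ((k : Int) + 1) := by
      have h1 : ¬ ((2 * k + 3) % 2 = 0) := by omega
      simp only [mO, if_neg h1]
      push_cast
      ring
    simp [e1, e2]

-- A's ordered_m list is the canonical m sequence of the level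
theorem orderedM_eq (n : Nat) :
    nollOrderedM (n : Int) = (List.range (n + 1)).map (fun i : Nat => nollM (n : Int) (i : Int)) := by
  have hm : PySem.Int.mod (n : Int) 2 = ((n % 2 : Nat) : Int) := by
    exact_mod_cast PySem.Int.mod_natCast n 2
  rcases Nat.even_or_odd n with ⟨k, hk⟩ | ⟨k, hk⟩
  · have hn : PySem.Int.mod (n : Int) 2 = 0 := by rw [hm]; omega
    rw [show (List.range (n + 1)).map (fun i : Nat => nollM (n : Int) (i : Int))
          = (List.range (n + 1)).map mE from List.map_congr_left (fun i _ => nollM_even _ hn i)]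
    simp only [nollOrderedM, if_pos hn]
    rw [show ((n : Int) + 1) = 2 * (k : Int) + 1 by omega, pyRange_even,
        PySem.List.foldl_append_eq_flatMap, show n + 1 = 2 * k + 1 by omega]
    exact even_flat k
  · have hn : ¬ PySem.Int.mod (n : Int) 2 = 0 := by rw [hm]; omega
    rw [show (List.range (n + 1)).map (fun i : Nat => nollM (n : Int) (i : Int))
          = (List.range (n + 1)).map mO from List.map_congr_left (fun i _ => nollM_odd _ hn i)]
    simp only [nollOrderedM, if_neg hn]
    rw [show ((n : Int) + 1) = 2 * (k : Int) + 2 by omega, pyRange_odd,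
        PySem.List.foldl_append_eq_flatMap, show n + 1 = 2 * k + 2 by omega]
    simpa using odd_flat k

-- indexing the canonical list inside a level
theorem specUpTo_getElem (n g : Nat) (h1 : tri n ≤ g) (_h2 : g < tri (n + 1))
    (hlen : g < (specUpTo (n + 1)).length) :
    (specUpTo (n + 1))[g] = ((n : Int), nollM (n : Int) ((g - tri n : Nat) : Int)) := by
  have hl : (specUpTo n).length = tri n := length_specUpTo n
  have htri : tri (n + 1) = tri n + (n + 1) := rfl
  simp only [specUpTo]
  rw [List.getElem_append_right (by omega)]
  simp only [levelList]
  rw [List.getElem_map, List.getElem_range]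
  congr 2
  omega

-- ===== A-side =====

theorem nollInner_eq (t : Nat) (n : Int) (ms : List Int) (pairs : List (Int × Int))
    (h : pairs.length < t) :
    nollInner (t : Int) n ms pairs = (pairs ++ ms.map (fun m => (n, m))).take t := by
  induction ms generalizing pairs with
  | nil =>
    simp only [nollInner, List.map_nil, List.append_nil]
    rw [List.take_of_length_le (by omega)]
  | cons m ms ih =>
    simp only [nollInner]
    by_cases he : pairs.length + 1 = t
    · have : ((pairs ++ [(n, m)]).length : Int) = (t : Int) := by simp; omega
      rw [if_pos this]
      rw [List.map_cons, ← he]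
      rw [show pairs ++ (n, m) :: ms.map (fun m => (n, m)) = (pairs ++ [(n, m)]) ++ ms.map (fun m => (n, m)) by simp]
      rw [List.take_append_of_le_length (by simp), List.take_of_length_le (by simp)]
    · have : ¬ (((pairs ++ [(n, m)]).length : Int) = (t : Int)) := by simp; omega
      rw [if_neg this, ih (pairs ++ [(n, m)]) (by simp; omega)]
      simp

theorem nollLoop_stop (t : Int) (f : Nat) (n : Int) (pairs : List (Int × Int))
    (h : ¬ ((pairs.length : Int) < t)) : nollLoop t f n pairs = pairs := by
  cases f <;> simp [nollLoop, h]

theorem nollLoop_main (N : Nat) : ∀ (fuel n : Nat), tri n < N → N ≤ fuel + tri n →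
    nollLoop (N : Int) fuel (n : Int) (specUpTo n) = (specUpTo N).take N := by
  intro fuel
  induction fuel with
  | zero => intro n h1 h2; omega
  | succ f ih =>
    intro n h1 h2
    simp only [nollLoop]
    rw [if_pos (by rw [length_specUpTo]; exact_mod_cast h1)]
    have hin : nollInner (N : Int) (n : Int) (nollOrderedM (n : Int)) (specUpTo n)
        = (specUpTo n ++ (nollOrderedM (n : Int)).map (fun m => ((n : Int), m))).take N :=
      nollInner_eq N (n : Int) _ _ (by rw [length_specUpTo]; exact h1)
    have hlev : (List.range (n + 1)).map ((fun m => ((n : Int), m)) ∘ (fun i : Nat => nollM (n : Int) (i : Int)))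
        = levelList n := rfl
    have hsp : specUpTo n ++ levelList n = specUpTo (n + 1) := rfl
    rw [hin, orderedM_eq, List.map_map, hlev, hsp]
    have htri : tri (n + 1) = tri n + (n + 1) := rfl
    have hcast : ((n : Int) + 1) = ((n + 1 : Nat) : Int) := by push_cast; ring
    by_cases hle : N ≤ tri (n + 1)
    · rw [hcast, nollLoop_stop]
      · exact take_specUpTo_eq hle (tri_ge N)
      · rw [List.length_take, length_specUpTo]
        have : min N (tri (n + 1)) = N := by omega
        rw [this]
        omega
    · have hlt : tri (n + 1) < N := by omega
      rw [List.take_of_length_le (by rw [length_specUpTo]; omega), hcast]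
      exact ih (n + 1) hlt (by omega)

-- ===== B-side =====

theorem lv_step (g : Nat) :
    (if ((g : Int) - ((tri (lv (g - 1)) : Nat) : Int) > ((lv (g - 1) : Nat) : Int)) then
        (((lv (g - 1) : Nat) : Int) + 1, ((tri (lv (g - 1)) : Nat) : Int) + ((lv (g - 1) : Nat) : Int) + 1)
      else (((lv (g - 1) : Nat) : Int), ((tri (lv (g - 1)) : Nat) : Int)))
    = (((lv g : Nat) : Int), ((tri (lv g) : Nat) : Int)) := by
  cases g with
  | zero => norm_num [lv, tri]
  | succ g' =>
    have htri : tri (lv g' + 1) = tri (lv g') + (lv g' + 1) := rfl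
    simp only [Nat.add_sub_cancel]
    by_cases h : tri (lv g' + 1) ≤ g' + 1
    · rw [if_pos (by push_cast; omega)]
      simp only [lv, if_pos h, Prod.mk.injEq]
      constructor <;> push_cast <;> omega
    · rw [if_neg (by push_cast; omega)]
      simp only [lv, if_neg h]

theorem take_succ_elem (g : Nat) :
    (specUpTo (lv g + 1)).take g ++ [((lv g : Int), nollM (lv g : Int) ((g - tri (lv g) : Nat) : Int))]
      = (specUpTo (lv g + 1)).take (g + 1) := by
  have hb := lv_bounds g
  have hlen : g < (specUpTo (lv g + 1)).length := by rw [length_specUpTo]; exact hb.2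
  rw [← List.take_append_getElem hlen, specUpTo_getElem (lv g) g hb.1 hb.2 hlen]

theorem fold_main (g : Nat) :
    ((List.range g).map (fun k : Nat => (k : Int))).foldl nollStep ([], 0, 0)
      = ((specUpTo (lv g + 1)).take g, ((lv (g - 1) : Nat) : Int), ((tri (lv (g - 1)) : Nat) : Int)) := by
  induction g with
  | zero => simp [lv, tri]
  | succ g ih =>
    rw [List.range_succ, List.map_append, List.foldl_append, ih]
    simp only [List.map_cons, List.map_nil, List.foldl_cons, List.foldl_nil, nollStep, Nat.add_sub_cancel]
    rw [lv_step g]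
    show (List.take g (specUpTo (lv g + 1)) ++
          [(((lv g : Nat) : Int), nollM ((lv g : Nat) : Int) ((g : Int) - ((tri (lv g) : Nat) : Int)))],
        ((lv g : Nat) : Int), ((tri (lv g) : Nat) : Int))
      = (List.take (g + 1) (specUpTo (lv (g + 1) + 1)), ((lv g : Nat) : Int), ((tri (lv g) : Nat) : Int))
    have hsub : (g : Int) - ((tri (lv g) : Nat) : Int) = ((g - tri (lv g) : Nat) : Int) := by
      have := (lv_bounds g).1
      omega
    rw [hsub, take_succ_elem g,
        take_specUpTo_eq (a := lv g + 1) (b := lv (g + 1) + 1)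
          (by have := (lv_bounds g).2; omega) (by have := (lv_bounds (g + 1)).2; omega)]

theorem alt_eq (t : Int) : noll_pairs_py_alt t = (specUpTo t.toNat).take t.toNat := by
  unfold noll_pairs_py_alt
  rw [PySem.List.pyRange_one]
  have hmap : (List.range (t - 0).toNat).map (fun k : Nat => (0 : Int) + (k : Int))
      = (List.range t.toNat).map (fun k : Nat => (k : Int)) := by simp
  rw [hmap, fold_main]
  exact take_specUpTo_eq (by have := (lv_bounds t.toNat).2; omega) (tri_ge t.toNat)

-- ===== VERDICT (by name: the statement is the Claim_ definition above) =====
theorem noll_pairs_py_spec : Claim_equal_noll_pairs_py := by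
  intro t _
  unfold Spec_noll_pairs_py
  rw [alt_eq]
  rcases le_or_gt t 0 with h | h
  · have h0 : t.toNat = 0 := by omega
    simp [noll_pairs_py, h0, nollLoop_stop t 0 0 [] (by simp; omega)]
  · have h0 : (t.toNat : Int) = t := by omega
    have := nollLoop_main t.toNat t.toNat 0 (by simp [tri]; omega) (by simp [tri])
    simpa [noll_pairs_py, h0, specUpTo] using this
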